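-- pv_equiv track=rewrite | github.com/Sophusticated/PrivateSetIntersection | march.py | equal_sum_disjoint_subsets
-- ===== SOURCE A (Python) =====
-- def equal_sum_disjoint_subsets(values):
--     n = len(values)
--     if n < 2:
--         return None
--
--     sums = {}
--     for mask in range(1, 1 << n):
--         s = sum(values[i] for i in range(n) if mask >> i & 1)
--         if s in sums:
--             for prev in sums[s]:
--                 if prev & mask == 0:
--                     a = [values[i] for i in range(n) if prev >> i & 1]
--                     b = [values[i] for i in range(n) if mask >> i & 1]
--                     return a, b
--             sums[s].append(mask)
--         else:
--             sums[s] = [mask]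
--     return None
-- ===== SOURCE B (Python) =====
-- def equal_sum_disjoint_subsets(values):
--     n = len(values)
--     if n < 2:
--         return None
--
--     # DP table of subset sums, grown lazily by doubling: after k doublings
--     # len(sums_dp) == 2**k and sums_dp[m] is the sum of the subset of
--     # values[:k] encoded by m.  Masks are visited in increasing order, so the
--     # table needs to double exactly when mask == len(sums_dp).
--     sums_dp = [0]
--     k = 0
--     buckets = {}
--     for mask in range(1, 1 << n):
--         if mask == len(sums_dp):
--             v = values[k]
--             sums_dp = sums_dp + [s + v for s in sums_dp]
--             k += 1
--         s = sums_dp[mask]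
--         bucket = buckets.get(s)
--         if bucket is not None:
--             for prev in bucket:
--                 if prev & mask == 0:
--                     a = [values[i] for i in range(n) if prev >> i & 1]
--                     b = [values[i] for i in range(n) if mask >> i & 1]
--                     return a, b
--             bucket.append(mask)
--         else:
--             buckets[s] = [mask]
--     return None
-- ===== Notes on version B (the rewrite author's own statement) =====
-- stated objective: faster
-- what changed: B replaces A's per-mask O(n) bit-scan summation with a lazily doubled DP table of subset sums (the table doubles exactly when mask reaches its length, incorporating one more value), so each mask's sum is a single table lookup; the bucket search itself is unchanged.
import Mathlib
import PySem

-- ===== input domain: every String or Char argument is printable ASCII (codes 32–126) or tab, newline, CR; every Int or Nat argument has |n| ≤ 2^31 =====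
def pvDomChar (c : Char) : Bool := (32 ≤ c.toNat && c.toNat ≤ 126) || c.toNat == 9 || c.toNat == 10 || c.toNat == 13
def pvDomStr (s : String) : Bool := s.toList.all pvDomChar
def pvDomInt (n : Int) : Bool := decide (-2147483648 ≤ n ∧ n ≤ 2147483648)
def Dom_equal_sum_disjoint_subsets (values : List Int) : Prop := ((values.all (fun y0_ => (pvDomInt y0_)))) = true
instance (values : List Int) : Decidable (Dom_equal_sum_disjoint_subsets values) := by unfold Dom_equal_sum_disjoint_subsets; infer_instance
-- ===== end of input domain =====

-- B: lazily doubled DP table of subset sums replaces A's per-mask bit-scan summation; objective: faster (measured).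


-- ===== PORT A =====
-- range(1, 1 << n): list(range(1, 2^n)) of nonnegative masks, ported as Nat (= List.range' 1 (2^n - 1))
def pvMasks (n : Nat) : List Nat := List.range' 1 (2 ^ n - 1)

-- [values[i] for i in range(n) if m >> i & 1]  (i < n = len(values), so getD never defaults)
def pvExtract (values : List Int) (n m : Nat) : List Int :=
  ((List.range n).filter (fun i => (m >>> i) &&& 1 = 1)).map (fun i => values.getD i 0)

-- sum(values[i] for i in range(n) if mask >> i & 1)
def pvBitSum (values : List Int) (n mask : Nat) : Int :=
  (List.range n).foldl (fun acc i => if (mask >>> i) &&& 1 = 1 then acc + values.getD i 0 else acc) 0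

-- inner 'for prev in sums[s]: if prev & mask == 0: return a, b'  (textually identical in A and B)
def pvFindPrev (values : List Int) (n : Nat) : List Nat → Nat → Option (List Int × List Int)
  | [], _ => none
  | prev :: rest, mask =>
    if prev &&& mask = 0 then some (pvExtract values n prev, pvExtract values n mask)
    else pvFindPrev values n rest mask

def pvLoopA (values : List Int) (n : Nat) : List Nat → PySem.Dict Int (List Nat) → Option (List Int × List Int)
  | [], _ => none
  | mask :: rest, sums =>
    let s := pvBitSum values n mask
    match sums.get? s with
    | some bucket =>
      match pvFindPrev values n bucket mask with
      | some ab => some ab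
      | none => pvLoopA values n rest (sums.insert s (bucket ++ [mask]))
    | none => pvLoopA values n rest (sums.insert s [mask])

def equal_sum_disjoint_subsets (values : List Int) : Option (List Int × List Int) :=
  let n := values.length
  if n < 2 then none
  else pvLoopA values n (pvMasks n) PySem.Dict.empty

-- ===== PORT B =====
-- the for-loop of Source B, carrying the lazily doubled DP table sums_dp (dp0) and the count k
-- of values already incorporated; values[k] is ported as getD (k < len(values) whenever read)
def pvLoopB (values : List Int) (n : Nat) :
    List Nat → List Int → Nat → PySem.Dict Int (List Nat) → Option (List Int × List Int)
  | [], _, _, _ => none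
  | mask :: rest, dp0, k0, buckets =>
    let dp := if mask = dp0.length then dp0 ++ dp0.map (fun s => s + values.getD k0 0) else dp0
    let k := if mask = dp0.length then k0 + 1 else k0
    let s := dp.getD mask 0
    match buckets.get? s with
    | some bucket =>
      match pvFindPrev values n bucket mask with
      | some ab => some ab
      | none => pvLoopB values n rest dp k (buckets.insert s (bucket ++ [mask]))
    | none => pvLoopB values n rest dp k (buckets.insert s [mask])

def equal_sum_disjoint_subsets_alt (values : List Int) : Option (List Int × List Int) :=
  let n := values.length
  if n < 2 then none
  else pvLoopB values n (pvMasks n) [0] 0 PySem.Dict.empty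

-- ===== PRECONDITION & SPEC =====
def Spec_equal_sum_disjoint_subsets (values : List Int) (out : Option (List Int × List Int)) : Prop := out = equal_sum_disjoint_subsets_alt values
instance (values : List Int) (out : Option (List Int × List Int)) : Decidable (Spec_equal_sum_disjoint_subsets values out) := by unfold Spec_equal_sum_disjoint_subsets; infer_instance

-- ===== CLAIM (what is proved, stated in full; the proofs are below) =====
def Claim_equal_equal_sum_disjoint_subsets : Prop := ∀ (values : List Int), Dom_equal_sum_disjoint_subsets values → Spec_equal_sum_disjoint_subsets values (equal_sum_disjoint_subsets values)

-- ===== LEMMAS AND PROOFS =====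

-- reference subset sum, consuming the mask bit by bit
def pvSubsetSum : List Int → Nat → Int
  | [], _ => 0
  | v :: t, m => (if m % 2 = 1 then v else 0) + pvSubsetSum t (m / 2)

-- the fully built DP table for a value list (proof-side model of sums_dp)
def pvBuildDP (values : List Int) : List Int :=
  values.foldl (fun acc v => acc ++ acc.map (fun s => s + v)) [0]

theorem pvBitSum_foldl_aux (values : List Int) (mask : Nat) (a : Int) :
    (List.range values.length).foldl
      (fun acc i => if (mask >>> i) &&& 1 = 1 then acc + values.getD i 0 else acc) a
    = a + pvSubsetSum values mask := by
  induction values generalizing mask a with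
  | nil => simp [pvSubsetSum]
  | cons v t ih =>
    rw [List.length_cons, List.range_succ_eq_map, List.foldl_cons, List.foldl_map]
    have hfun : (fun (acc : Int) (i : Nat) =>
          if (mask >>> (Nat.succ i)) &&& 1 = 1 then acc + (v :: t).getD (Nat.succ i) 0 else acc)
        = (fun (acc : Int) (i : Nat) =>
          if ((mask / 2) >>> i) &&& 1 = 1 then acc + t.getD i 0 else acc) := by
      funext acc i
      rw [Nat.shiftRight_succ_inside]
      simp
    rw [hfun, ih (mask / 2)]
    rw [pvSubsetSum]
    simp only [Nat.shiftRight_zero, Nat.and_one_is_mod]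
    split_ifs with hb
    · simp; ring
    · ring

theorem pvBitSum_eq (values : List Int) (mask : Nat) :
    pvBitSum values values.length mask = pvSubsetSum values mask := by
  have := pvBitSum_foldl_aux values mask 0
  rw [zero_add] at this
  rw [pvBitSum, this]

theorem pvBuildDP_aux (values : List Int) :
    ∀ (acc : List Int) (m r : Nat), r < acc.length → m < 2 ^ values.length →
    (values.foldl (fun acc v => acc ++ acc.map (fun s => s + v)) acc).getD (m * acc.length + r) 0
      = acc.getD r 0 + pvSubsetSum values m := by
  induction values with
  | nil =>
    intro acc m r hr hm
    have : m = 0 := by simpa using hm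
    subst this
    simp [pvSubsetSum]
  | cons v t ih =>
    intro acc m r hr hm
    simp only [List.foldl_cons]
    set acc' := acc ++ acc.map (fun s => s + v) with hacc'
    have hlen : acc'.length = 2 * acc.length := by simp [hacc']; omega
    have hidx : m * acc.length + r = (m / 2) * acc'.length + ((m % 2) * acc.length + r) := by
      rw [hlen]; nlinarith [Nat.div_add_mod m 2]
    have hr' : (m % 2) * acc.length + r < acc'.length := by
      have : m % 2 < 2 := Nat.mod_lt _ (by omega)
      rw [hlen]; nlinarith
    have hm' : m / 2 < 2 ^ t.length := by
      simp only [List.length_cons, pow_succ] at hm; omega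
    rw [hidx, ih acc' (m / 2) _ hr' hm', pvSubsetSum]
    by_cases hb : m % 2 = 1
    · have hget : acc'.getD (acc.length + r) 0 = acc.getD r 0 + v := by
        rw [hacc', List.getD_eq_getElem?_getD,
          List.getElem?_append_right (Nat.le_add_right _ _), Nat.add_sub_cancel_left,
          List.getElem?_map, List.getElem?_eq_getElem hr]
        simp [List.getD_eq_getElem?_getD, List.getElem?_eq_getElem hr]
      rw [hb, one_mul, hget, if_pos rfl]
      ring
    · have hb0 : m % 2 = 0 := by omega
      have hget : acc'.getD (0 * acc.length + r) 0 = acc.getD r 0 := by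
        rw [Nat.zero_mul, Nat.zero_add, hacc', List.getD_eq_getElem?_getD,
          List.getElem?_append_left hr, List.getD_eq_getElem?_getD]
      rw [hb0, hget, if_neg (by omega)]
      ring

theorem pvBuildDP_getD (values : List Int) (m : Nat) (hm : m < 2 ^ values.length) :
    (pvBuildDP values).getD m 0 = pvSubsetSum values m := by
  have := pvBuildDP_aux values [0] m 0 (by simp) hm
  simpa [pvBuildDP] using this

theorem pvBuildDP_length_aux (values : List Int) :
    ∀ acc : List Int,
      (values.foldl (fun acc v => acc ++ acc.map (fun s => s + v)) acc).length
        = acc.length * 2 ^ values.length := by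
  induction values with
  | nil => intro acc; simp
  | cons v t ih =>
    intro acc
    rw [List.foldl_cons, ih]
    simp [pow_succ]
    ring

theorem pvBuildDP_length (values : List Int) : (pvBuildDP values).length = 2 ^ values.length := by
  simpa [pvBuildDP] using pvBuildDP_length_aux values [0]

theorem pvBuildDP_take_succ (values : List Int) (k : Nat) (hk : k < values.length) :
    pvBuildDP (values.take (k + 1))
      = pvBuildDP (values.take k)
        ++ (pvBuildDP (values.take k)).map (fun s => s + values.getD k 0) := by
  have ht : values.take (k + 1) = values.take k ++ [values[k]] := by
    rw [List.take_add_one, List.getElem?_eq_getElem hk]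
    rfl
  rw [pvBuildDP, pvBuildDP, ht, List.foldl_append]
  have hv : values.getD k 0 = values[k] := by
    rw [List.getD_eq_getElem?_getD, List.getElem?_eq_getElem hk]
    rfl
  simp only [List.foldl_cons, List.foldl_nil]
  rw [hv]

theorem pvSubsetSum_zero (values : List Int) : pvSubsetSum values 0 = 0 := by
  induction values with
  | nil => rfl
  | cons v t ih => simp [pvSubsetSum, ih]

theorem pvSubsetSum_take (values : List Int) :
    ∀ (k m : Nat), m < 2 ^ k → pvSubsetSum (values.take k) m = pvSubsetSum values m := by
  induction values with
  | nil => intro k m _; simp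
  | cons v t ih =>
    intro k m hm
    cases k with
    | zero =>
      have : m = 0 := by simpa using hm
      subst this
      simp [pvSubsetSum_zero]
    | succ k =>
      rw [List.take_succ_cons, pvSubsetSum, pvSubsetSum,
        ih k (m / 2) (by rw [pow_succ] at hm; omega)]

-- value of the lazy table at mask, via the two lemmas above
theorem pvDP_getD (values : List Int) (k m : Nat) (hk : k ≤ values.length) (hm : m < 2 ^ k) :
    (pvBuildDP (values.take k)).getD m 0 = pvSubsetSum values m := by
  have hlen : (values.take k).length = k := by simp [hk]
  rw [pvBuildDP_getD (values.take k) m (by rw [hlen]; exact hm), pvSubsetSum_take values k m hm]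

theorem pvTakeDP_length (values : List Int) (k : Nat) (hk : k ≤ values.length) :
    (pvBuildDP (values.take k)).length = 2 ^ k := by
  rw [pvBuildDP_length]
  simp [hk]

theorem pvLoop_eq (values : List Int) :
    ∀ (len a k : Nat) (d : PySem.Dict Int (List Nat)),
      1 ≤ a → k ≤ values.length → a ≤ 2 ^ k → a + len ≤ 2 ^ values.length →
      pvLoopA values values.length (List.range' a len) d
        = pvLoopB values values.length (List.range' a len) (pvBuildDP (values.take k)) k d := by
  intro len
  induction len with
  | zero => intro a k d _ _ _ _; rfl
  | succ len ih =>
    intro a k d ha hk hak hbound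
    rw [List.range'_succ, pvLoopA, pvLoopB]
    have hdpl : (pvBuildDP (values.take k)).length = 2 ^ k := pvTakeDP_length values k hk
    by_cases hgrow : a = (pvBuildDP (values.take k)).length
    · -- the table doubles: a = 2^k, so k < len(values) and the new table is for take (k+1)
      have ha2 : a = 2 ^ k := by rw [hgrow, hdpl]
      have hkn : k < values.length := by
        by_contra hc
        have : values.length ≤ k := by omega
        have : (2:Nat) ^ values.length ≤ 2 ^ k := Nat.pow_le_pow_right (by omega) this
        omega
      have hstep : pvBuildDP (values.take k)
            ++ (pvBuildDP (values.take k)).map (fun s => s + values.getD k 0)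
          = pvBuildDP (values.take (k + 1)) := (pvBuildDP_take_succ values k hkn).symm
      simp only [if_pos hgrow, hstep]
      have ha' : a < 2 ^ (k + 1) := by rw [pow_succ]; omega
      rw [pvBitSum_eq, pvDP_getD values (k + 1) a (by omega) ha']
      cases h : PySem.Dict.get? d (pvSubsetSum values a) with
      | none =>
        dsimp only
        exact ih (a + 1) (k + 1) _ (by omega) (by omega) (by omega) (by omega)
      | some bucket =>
        dsimp only
        cases hf : pvFindPrev values values.length bucket a with
        | none => exact ih (a + 1) (k + 1) _ (by omega) (by omega) (by omega) (by omega)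
        | some ab => rfl
    · -- no doubling: a < 2^k
      have ha' : a < 2 ^ k := by rw [hdpl] at hgrow; omega
      simp only [if_neg hgrow]
      rw [pvBitSum_eq, pvDP_getD values k a hk ha']
      cases h : PySem.Dict.get? d (pvSubsetSum values a) with
      | none =>
        dsimp only
        exact ih (a + 1) k _ (by omega) hk (by omega) (by omega)
      | some bucket =>
        dsimp only
        cases hf : pvFindPrev values values.length bucket a with
        | none => exact ih (a + 1) k _ (by omega) hk (by omega) (by omega)
        | some ab => rfl

-- ===== VERDICT (by name: the statement is the Claim_ definition above) =====
theorem equal_sum_disjoint_subsets_spec : Claim_equal_equal_sum_disjoint_subsets := by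
  intro values _
  unfold Spec_equal_sum_disjoint_subsets equal_sum_disjoint_subsets equal_sum_disjoint_subsets_alt
  by_cases h : values.length < 2
  · simp [h]
  · simp only [h, if_false]
    have h1 : (1:Nat) ≤ 2 ^ values.length := Nat.one_le_two_pow
    have := pvLoop_eq values (2 ^ values.length - 1) 1 0 PySem.Dict.empty
      (by omega) (by omega) (by simp) (by omega)
    simpa [pvMasks, pvBuildDP] using this
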